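-- pv_equiv track=rewrite | github.com/ThinkOffApp/multiquark-lattice-qcd | gpt/applications/hmc/su2_2q_signal_scan.py | parse_time_dirs
-- ===== SOURCE A (Python) =====
-- def parse_time_dirs(value, nd):
--     txt = (value or "").strip().lower()
--     if txt in {"", "all", "*"}:
--         return list(range(nd))
--     out = []
--     for x in value.split(","):
--         x = x.strip()
--         if not x:
--             continue
--         mu = int(x)
--         if 0 <= mu < nd:
--             out.append(mu)
--     out = sorted(set(out))
--     if not out:
--         return list(range(nd))
--     return out
-- ===== SOURCE B (Python) =====
-- def parse_time_dirs(value, nd):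
--     txt = (value or "").strip().lower()
--     if txt in {"", "all", "*"}:
--         return list(range(nd))
--     vals = [int(s) for s in (t.strip() for t in value.split(",")) if s]
--     seen = {v for v in vals if 0 <= v < nd}
--     result = []
--     while seen:
--         m = min(seen)
--         seen.remove(m)
--         result.append(m)
--     return result if result else list(range(nd))
-- ===== Notes on version B (the rewrite author's own statement) =====
-- stated objective: alternative
-- what changed: Instead of a collect-loop finished by sorted(set(out)), B uses staged comprehensions (parse tokens, filter in-range values into a set) and then builds the sorted result by repeatedly extracting the minimum from the set - selection extraction replaces the library comparison sort.
import Mathlib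
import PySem

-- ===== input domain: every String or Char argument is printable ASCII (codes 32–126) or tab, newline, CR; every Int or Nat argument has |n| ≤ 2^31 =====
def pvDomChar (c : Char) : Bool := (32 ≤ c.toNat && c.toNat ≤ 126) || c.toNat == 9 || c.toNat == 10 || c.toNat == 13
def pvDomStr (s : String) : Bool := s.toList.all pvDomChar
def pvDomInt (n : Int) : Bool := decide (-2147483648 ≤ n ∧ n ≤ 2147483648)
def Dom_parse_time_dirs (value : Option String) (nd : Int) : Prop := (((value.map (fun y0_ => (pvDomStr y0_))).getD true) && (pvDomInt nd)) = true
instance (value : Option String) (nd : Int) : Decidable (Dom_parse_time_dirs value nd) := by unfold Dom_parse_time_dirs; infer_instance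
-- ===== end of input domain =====

-- B replaces A's collect-loop + sorted(set(...)) with staged comprehensions into a set
-- followed by a selection loop that repeatedly extracts the minimum — no sort call
-- (objective: alternative; no behaviour change).

-- ===== PORT A =====
def parse_time_dirs (value : Option String) (nd : Int) : List Int :=
  let txt := PySem.Str.lower (PySem.Str.strip (value.getD ""))
  if txt = "" ∨ txt = "all" ∨ txt = "*" then PySem.List.pyRange 0 nd 1
  else
    let out : List Int := ((PySem.Str.split? (value.getD "") ",").getD []).foldl (fun out x =>
      let x := PySem.Str.strip x
      if x = "" then out
      else
        -- Pre_ guarantees int(x) succeeds; Python raises ValueError outside Pre_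
        let mu := (PySem.Int.ofStr? x).getD 0
        if 0 ≤ mu ∧ mu < nd then out ++ [mu] else out) []
    let out := PySem.List.sorted (PySem.Set.ofList out) (fun x => x) false
    if out = [] then PySem.List.pyRange 0 nd 1 else out

-- ===== PORT B =====
-- Source B's while-loop 'm = min(seen); seen.remove(m); result.append(m)' as the obvious
-- structural recursion on the shrinking set (min over the set = PySem.List.min?).
def pvExtractMins (s : List Int) : List Int :=
  match hm : PySem.List.min? s (fun x => x) with
  | none => []
  | some m => m :: pvExtractMins (s.erase m)
termination_by s.length
decreasing_by
  have hmem := PySem.List.min?_mem hm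
  have := List.length_erase_of_mem hmem
  have : 0 < s.length := List.length_pos_of_mem hmem
  omega

-- Source B's comprehensions: vals = [int(s) for s in (t.strip() for t in split) if s]
-- → map strip then filterMap; seen = {v for v in vals if 0 <= v < nd} → Set.ofList of a
-- filter; then the extraction loop above.
def parse_time_dirs_alt (value : Option String) (nd : Int) : List Int :=
  let txt := PySem.Str.lower (PySem.Str.strip (value.getD ""))
  if txt = "" ∨ txt = "all" ∨ txt = "*" then PySem.List.pyRange 0 nd 1
  else
    let vals : List Int := (((PySem.Str.split? (value.getD "") ",").getD []).map
        PySem.Str.strip).filterMap (fun s =>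
          -- Pre_ guarantees int(s) succeeds; Python raises ValueError outside Pre_
          if s = "" then none else some ((PySem.Int.ofStr? s).getD 0))
    let seen := PySem.Set.ofList (vals.filter (fun v => decide (0 ≤ v ∧ v < nd)))
    let result := pvExtractMins seen
    if result = [] then PySem.List.pyRange 0 nd 1 else result

-- ===== PRECONDITION & SPEC =====
-- Pre_ excludes exactly the inputs where Python's int(x) raises ValueError on some
-- non-empty stripped token (both A and B raise there).
def Pre_parse_time_dirs (value : Option String) (nd : Int) : Prop :=
  (let txt := PySem.Str.lower (PySem.Str.strip (value.getD ""))
   txt = "" ∨ txt = "all" ∨ txt = "*") ∨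
  ∀ t ∈ (PySem.Str.split? (value.getD "") ",").getD [],
    PySem.Str.strip t = "" ∨ (PySem.Int.ofStr? (PySem.Str.strip t)).isSome
instance (value : Option String) (nd : Int) : Decidable (Pre_parse_time_dirs value nd) := by
  unfold Pre_parse_time_dirs; infer_instance

def pvWitness_parse_time_dirs : Option String × Int := (some "3, 1, 2, 9, 1", 4)

def Spec_parse_time_dirs (value : Option String) (nd : Int) (out : List Int) : Prop := out = parse_time_dirs_alt value nd
instance (value : Option String) (nd : Int) (out : List Int) : Decidable (Spec_parse_time_dirs value nd out) := by unfold Spec_parse_time_dirs; infer_instance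

-- ===== CLAIM (what is proved, stated in full; the proofs are below) =====
def Claim_equal_parse_time_dirs : Prop := ∀ (value : Option String) (nd : Int), Dom_parse_time_dirs value nd → Pre_parse_time_dirs value nd → Spec_parse_time_dirs value nd (parse_time_dirs value nd)

-- ===== LEMMAS AND PROOFS =====

-- A's collect-loop equals B's staged map/filterMap/filter pipeline (same tokens, same order).
theorem pv_fold_eq_filter (nd : Int) (ts : List String) : ∀ (acc : List Int),
    ts.foldl (fun out x =>
      let x := PySem.Str.strip x
      if x = "" then out
      else
        let mu := (PySem.Int.ofStr? x).getD 0
        if 0 ≤ mu ∧ mu < nd then out ++ [mu] else out) acc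
    = acc ++ ((ts.map PySem.Str.strip).filterMap (fun s =>
        if s = "" then none else some ((PySem.Int.ofStr? s).getD 0))).filter
          (fun v => decide (0 ≤ v ∧ v < nd)) := by
  induction ts with
  | nil => intro acc; simp
  | cons t ts ih =>
    intro acc
    simp only [List.foldl_cons, List.map_cons, List.filterMap_cons]
    by_cases h1 : PySem.Str.strip t = ""
    · simpa [h1] using ih acc
    · by_cases h2 : 0 ≤ (PySem.Int.ofStr? (PySem.Str.strip t)).getD 0 ∧
          (PySem.Int.ofStr? (PySem.Str.strip t)).getD 0 < nd
      · simp [h1, h2, ih]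
      · simp [h1, h2, ih]

-- Two strictly increasing integer lists with the same members are equal.
theorem pv_chain_eq : ∀ (l1 l2 : List Int), l1.Pairwise (· < ·) → l2.Pairwise (· < ·) →
    (∀ x, x ∈ l1 ↔ x ∈ l2) → l1 = l2 := by
  intro l1
  induction l1 with
  | nil =>
    intro l2 _ _ hm
    cases l2 with
    | nil => rfl
    | cons b t => exact absurd ((hm b).mpr (List.mem_cons_self)) (by simp)
  | cons a t1 ih =>
    intro l2 h1 h2 hm
    cases l2 with
    | nil => exact absurd ((hm a).mp (List.mem_cons_self)) (by simp)
    | cons b t2 =>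
      have ha : a = b ∨ a ∈ t2 := List.mem_cons.mp ((hm a).mp List.mem_cons_self)
      have hb : b = a ∨ b ∈ t1 := List.mem_cons.mp ((hm b).mpr List.mem_cons_self)
      have hab : a = b := by
        rcases ha with h | h
        · exact h
        · rcases hb with h' | h'
          · omega
          · have := (List.pairwise_cons.mp h1).1 b h'
            have := (List.pairwise_cons.mp h2).1 a h
            omega
      subst hab
      have htail : ∀ x, x ∈ t1 ↔ x ∈ t2 := by
        intro x
        constructor
        · intro hx
          have hlt := (List.pairwise_cons.mp h1).1 x hx
          rcases List.mem_cons.mp ((hm x).mp (List.mem_cons_of_mem _ hx)) with h | h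
          · omega
          · exact h
        · intro hx
          have hlt := (List.pairwise_cons.mp h2).1 x hx
          rcases List.mem_cons.mp ((hm x).mpr (List.mem_cons_of_mem _ hx)) with h | h
          · omega
          · exact h
      rw [ih t2 (List.pairwise_cons.mp h1).2 (List.pairwise_cons.mp h2).2 htail]

-- Extraction preserves membership.
theorem pv_extract_mem (s : List Int) (x : Int) : x ∈ pvExtractMins s ↔ x ∈ s := by
  induction s using pvExtractMins.induct with
  | case1 s hm =>
    rw [pvExtractMins.eq_def]
    split
    · simp [(PySem.List.min?_eq_none_iff s (fun x => x)).mp hm]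
    · rename_i m hm'; rw [hm] at hm'; cases hm'
  | case2 s m hm ih =>
    have hmem := PySem.List.min?_mem hm
    rw [pvExtractMins.eq_def]
    split
    · rename_i hm'; rw [hm] at hm'; cases hm'
    · rename_i m' hm'
      rw [hm] at hm'; cases hm'
      simp only [List.mem_cons, ih]
      constructor
      · rintro (rfl | h)
        · exact hmem
        · exact List.mem_of_mem_erase h
      · intro h
        by_cases hx : x = m
        · exact Or.inl hx
        · exact Or.inr ((List.mem_erase_of_ne hx).mpr h)

-- Extraction from a duplicate-free set is strictly increasing.
theorem pv_extract_pairwise (s : List Int) (hn : s.Nodup) :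
    (pvExtractMins s).Pairwise (· < ·) := by
  induction s using pvExtractMins.induct with
  | case1 s hm =>
    rw [pvExtractMins.eq_def]
    split
    · simp
    · rename_i m hm'; rw [hm] at hm'; cases hm'
  | case2 s m hm ih =>
    rw [pvExtractMins.eq_def]
    split
    · simp
    · rename_i m' hm'
      rw [hm] at hm'; cases hm'
      refine List.pairwise_cons.mpr ⟨?_, ih (hn.erase m)⟩
      intro y hy
      have hy' : y ∈ s.erase m := (pv_extract_mem _ _).mp hy
      have hyne : y ≠ m := by
        intro h; subst h
        exact (List.Nodup.not_mem_erase hn) hy'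
      have := PySem.List.min?_isMin hm y (List.mem_of_mem_erase hy')
      omega

-- ===== VERDICT (by name: the statement is the Claim_ definition above) =====
theorem parse_time_dirs_spec : Claim_equal_parse_time_dirs := by
  intro value nd _ _
  unfold Spec_parse_time_dirs parse_time_dirs parse_time_dirs_alt
  by_cases hg : PySem.Str.lower (PySem.Str.strip (value.getD "")) = "" ∨
      PySem.Str.lower (PySem.Str.strip (value.getD "")) = "all" ∨
      PySem.Str.lower (PySem.Str.strip (value.getD "")) = "*"
  · simp only [hg, if_pos]
  · simp only [hg, if_false]
    set ts := (PySem.Str.split? (value.getD "") ",").getD [] with hts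
    set V := ((ts.map PySem.Str.strip).filterMap (fun s =>
        if s = "" then none else some ((PySem.Int.ofStr? s).getD 0))).filter
          (fun v => decide (0 ≤ v ∧ v < nd)) with hV
    have hL : ts.foldl (fun out x =>
        let x := PySem.Str.strip x
        if x = "" then out
        else
          let mu := (PySem.Int.ofStr? x).getD 0
          if 0 ≤ mu ∧ mu < nd then out ++ [mu] else out) ([] : List Int) = V := by
      have h := pv_fold_eq_filter nd ts []
      rw [List.nil_append] at h
      rw [h, ← hV]
    rw [hL]
    have hkey : PySem.List.sorted (PySem.Set.ofList V) (fun x => x) false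
        = pvExtractMins (PySem.Set.ofList V) := by
      apply pv_chain_eq
      · exact PySem.List.sorted_ofList_pairwise_lt V
      · exact pv_extract_pairwise _ (PySem.Set.nodup_ofList V)
      · intro x
        rw [PySem.List.mem_sorted, pv_extract_mem]
    rw [hkey]
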